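-- pv_equiv track=rewrite | github.com/zBabar/Unconditional_Models | baselines_new.py | optimal_report_bleu2_given_words
-- ===== SOURCE A (Python) =====
-- import heapq as pq
-- from collections import defaultdict, namedtuple
--
-- def n_grams(words,n):
--   """
--   Make a collection of n-grams for a report, represented as a dictionary (tuple -> count)
--   """
--   if isinstance(words,str):
--     words = words.split()
--   count = defaultdict(int)
--   for i in range(len(words)-n+1):
--     ngram = tuple(words[i:i+n])
--     count[ngram] += 1
--   return count
--
-- def build_count_table(reports_ngrams):
--   """
--   Like build_word_count_table, but each report is represented as a dict of ngrams
--   """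
--   table = defaultdict(int)
--   for r in reports_ngrams:
--     for w,count in r.items():
--       for i in range(count):
--         table[(w,i)] += 1
--   return table
--
-- def optimal_report_bleu2_given_words(reports, words):
--   # table of 2-grams
--   table = build_count_table([n_grams(r,2) for r in reports])
--   # add to heap, but only 2-grams that use relevant words
--   heap = []
--   for ((a,b),_),count in table.items():
--     if a in words and b in words:
--       pq.heappush(heap,(-count,a,b))
--   # start from disjoint words, join them together if possible
--   fragments = [[w] for w in words]
--   while len(heap) > 0 and len(fragments) > 1:
--     _,a,b = pq.heappop(heap)
--     # find fragment ending with a, and one starting with b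
--     fragment_a = [f for f in fragments if f[-1] == a]
--     if len(fragment_a) == 0:
--       continue
--     fragment_a = fragment_a[0]
--     fragment_b = [f for f in fragments if f[0] == b and f != fragment_a]
--     if len(fragment_b) == 0:
--       continue
--     fragment_b = fragment_b[0]
--     # join them
--     fragments.remove(fragment_a)
--     fragments.remove(fragment_b)
--     fragments.append(fragment_a + fragment_b)
--   # join
--   words = [w for f in fragments for w in f]
--   return ' '.join(words)
-- ===== SOURCE B (Python) =====
-- def optimal_report_bleu2_given_words(reports, words):
--   # Per-bigram lists of per-report counts expanded by conjugate partition (no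
--   # (bigram, occurrence-index) keyed table), then the greedy join driven by
--   # endpoint indexes: dicts word -> ids of fragments starting/ending with it,
--   # looked up per candidate instead of scanning the whole fragment list.
--   per = {}  # bigram -> list of its per-report counts (reports where it occurs)
--   for r in reports:
--     ws = r.split()
--     local = {}
--     for j in range(len(ws) - 1):
--       bg = (ws[j], ws[j + 1])
--       local[bg] = local.get(bg, 0) + 1
--     for bg, m in local.items():
--       per.setdefault(bg, []).append(m)
--   wordset = set(words)
--   entries = []
--   for (a, b), ms in per.items():
--     if a in wordset and b in wordset:
--       for k in range(1, max(ms) + 1):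
--         entries.append((-sum(1 for m in ms if m >= k), a, b))
--   entries.sort()
--   # fragments keyed by increasing id; dict order == A's fragments-list order
--   frags = {}
--   starts = {}
--   ends = {}
--   for i, w in enumerate(words):
--     frags[i] = [w]
--     starts.setdefault(w, []).append(i)
--     ends.setdefault(w, []).append(i)
--   nxt = len(words)
--   for _, a, b in entries:
--     ea = ends.get(a, [])
--     if not ea:
--       continue
--     ia = ea[0]
--     fa = frags[ia]
--     ib = next((i for i in starts.get(b, []) if frags[i] != fa), None)
--     if ib is None:
--       continue
--     fb = frags[ib]
--     ends[a].remove(ia)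
--     starts[fa[0]].remove(ia)
--     starts[b].remove(ib)
--     ends[fb[-1]].remove(ib)
--     del frags[ia]
--     del frags[ib]
--     frags[nxt] = fa + fb
--     starts.setdefault(fa[0], []).append(nxt)
--     ends.setdefault(fb[-1], []).append(nxt)
--     nxt += 1
--   return ' '.join(w for f in frags.values() for w in f)
-- ===== Notes on version B (the rewrite author's own statement) =====
-- stated objective: alternative
-- what changed: B derives each bigram's candidate entries from its per-report count list by conjugate-partition expansion instead of A's (bigram, occurrence-index)-keyed global table, sorts them once instead of using a heap, and runs the greedy join over endpoint indexes (dicts mapping a word to the ids of fragments starting/ending with it) looked up per candidate instead of A's two scans of the whole fragment list per candidate.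
import Mathlib
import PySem

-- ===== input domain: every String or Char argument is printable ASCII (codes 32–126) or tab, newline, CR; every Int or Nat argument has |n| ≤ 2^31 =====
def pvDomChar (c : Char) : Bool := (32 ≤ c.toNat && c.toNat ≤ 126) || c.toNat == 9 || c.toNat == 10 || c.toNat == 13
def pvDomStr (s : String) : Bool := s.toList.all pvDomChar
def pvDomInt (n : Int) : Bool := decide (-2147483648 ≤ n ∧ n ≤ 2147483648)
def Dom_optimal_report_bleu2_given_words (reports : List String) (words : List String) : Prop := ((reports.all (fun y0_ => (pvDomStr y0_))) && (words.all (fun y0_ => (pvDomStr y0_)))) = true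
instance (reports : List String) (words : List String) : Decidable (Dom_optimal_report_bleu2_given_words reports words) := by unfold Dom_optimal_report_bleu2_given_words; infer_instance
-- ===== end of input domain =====

-- B generates the candidate list per bigram from its per-report counts (conjugate-partition
-- expansion, no (bigram, occurrence-index) table) and runs the greedy join over endpoint
-- indexes (dicts word -> ids of fragments starting/ending with it) instead of scanning the
-- whole fragment list for each candidate (objective: alternative algorithm/data structure).

-- Python's `<` on the heap/sort tuples (-count, a, b): lexicographic on (int, str, str);
-- PySem has no tuple order, so the comparator is written out (String `<` is Python's, per PYSEM.md).
def pvLtT (p q : Int × String × String) : Bool :=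
  decide (p.1 < q.1) || (decide (p.1 = q.1) &&
    (decide (p.2.1 < q.2.1) || (decide (p.2.1 = q.2.1) && decide (p.2.2 < q.2.2))))

-- insertion into an ascending list: used by A's heap model (heappush) and by B's sort
def pvInsertT (x : Int × String × String) : List (Int × String × String) → List (Int × String × String)
  | [] => [x]
  | y :: t => if pvLtT x y then x :: y :: t else y :: pvInsertT x t

-- ===== PORT A =====
-- n_grams(r, 2): specialized to its only call n = 2; `tuple(words[i:i+2])` is the pair
-- (words[i], words[i+1]) (exact: i and i+1 are in range for every i in the loop's range)
def pvNgrams2 (r : String) : PySem.Dict (String × String) Int :=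
  (PySem.List.pyRange 0 (((PySem.Str.split₀ r).length : Int) - 2 + 1) 1).foldl
    (fun d i => d.modify (PySem.List.pyGetD (PySem.Str.split₀ r) i "",
      PySem.List.pyGetD (PySem.Str.split₀ r) (i + 1) "") 0 (· + 1))
    PySem.Dict.empty

def pvBuildCountTable (rs : List (PySem.Dict (String × String) Int)) :
    PySem.Dict ((String × String) × Int) Int :=
  rs.foldl (fun table r =>
    r.items.foldl (fun table wc =>
      (PySem.List.pyRange 0 wc.2 1).foldl
        (fun table i => table.modify (wc.1, i) 0 (· + 1)) table) table)
    PySem.Dict.empty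

-- heapq is modelled as a sorted-list priority queue: heappush = ordered insert (pvInsertT),
-- heappop = (head, tail).  Observationally exact for this caller: all pushes precede all pops,
-- heappop returns a minimal element, and equal tuples are indistinguishable values.
-- The loop is A's `while len(heap) > 0 and len(fragments) > 1`; `fragments.remove(x)` is
-- List.erase (first value-equal occurrence; the removed fragment is always present).
def pvLoopA : List (Int × String × String) → List (List String) → List (List String)
  | [], frags => frags
  | e :: rest, frags =>
    if frags.length > 1 then
      let fas := frags.filter (fun f => PySem.List.pyGetD f (-1) "" == e.2.1)
      if fas.length == 0 then pvLoopA rest frags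
      else
        let fa := PySem.List.pyGetD fas 0 []
        let fbs := frags.filter (fun f => PySem.List.pyGetD f 0 "" == e.2.2 && f ≠ fa)
        if fbs.length == 0 then pvLoopA rest frags
        else
          let fb := PySem.List.pyGetD fbs 0 []
          pvLoopA rest (((frags.erase fa).erase fb) ++ [fa ++ fb])
    else frags

def optimal_report_bleu2_given_words (reports : List String) (words : List String) : String :=
  PySem.Str.join " "
    ((pvLoopA
        ((pvBuildCountTable (reports.map (fun r => pvNgrams2 r))).items.foldl
          (fun heap kc =>
            if words.contains kc.1.1.1 && words.contains kc.1.1.2 then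
              pvInsertT (-kc.2, kc.1.1.1, kc.1.1.2) heap
            else heap) [])
        (words.map (fun w => [w]))).flatMap (fun f => f))

-- ===== PORT B =====
-- local: the per-report bigram counter built with get/insert
def pvLocal (ws : List String) : PySem.Dict (String × String) Int :=
  (PySem.List.pyRange 0 ((ws.length : Int) - 1) 1).foldl
    (fun d j => d.insert (PySem.List.pyGetD ws j "", PySem.List.pyGetD ws (j + 1) "")
      (d.getD (PySem.List.pyGetD ws j "", PySem.List.pyGetD ws (j + 1) "") 0 + 1))
    PySem.Dict.empty

-- per: bigram -> list of its per-report counts; `per.setdefault(bg, []).append(m)` is modify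
def pvPer (reports : List String) : PySem.Dict (String × String) (List Int) :=
  reports.foldl (fun per r =>
    (pvLocal (PySem.Str.split₀ r)).items.foldl
      (fun per bm => per.modify bm.1 [] (· ++ [bm.2])) per)
    PySem.Dict.empty

-- sum(1 for m in ms if m >= k)
def pvCntGe (ms : List Int) (k : Int) : Int :=
  ms.foldl (fun s m => if k ≤ m then s + 1 else s) 0

-- the entries list; max(ms) never sees an empty list (every key of per has at least one
-- appended count), so `(max? ms).getD 0` is exact at every reachable call
def pvEntries (reports : List String) (words : List String) : List (Int × String × String) :=
  (pvPer reports).items.foldl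
    (fun es kms =>
      if PySem.Set.contains (PySem.Set.ofList words) kms.1.1 &&
         PySem.Set.contains (PySem.Set.ofList words) kms.1.2 then
        (PySem.List.pyRange 1 ((PySem.List.max? kms.2 (fun y => y)).getD 0 + 1) 1).foldl
          (fun es2 k => es2 ++ [(-(pvCntGe kms.2 k), kms.1.1, kms.1.2)]) es
      else es)
    []

-- Python's sorted() on the entry tuples: a stable sort under the lexicographic tuple order
-- (insertion sort; duplicates are identical tuples, so stability has no observable effect)
def pvSortT (l : List (Int × String × String)) : List (Int × String × String) :=
  l.foldl (fun acc e => pvInsertT e acc) []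

-- initial fragments (id -> [w]) and endpoint indexes, built over enumerate(words);
-- `starts.setdefault(w, []).append(i)` is modify
def pvInitState (words : List String) :
    PySem.Dict Int (List String) × PySem.Dict String (List Int) × PySem.Dict String (List Int) :=
  (PySem.List.enumerate words 0).foldl
    (fun s iw =>
      (s.1.insert iw.1 [iw.2], s.2.1.modify iw.2 [] (· ++ [iw.1]),
       s.2.2.modify iw.2 [] (· ++ [iw.1])))
    (PySem.Dict.empty, PySem.Dict.empty, PySem.Dict.empty)

-- one candidate (a, b): `ends.get(a, [])` head, `next(... starts.get(b, []) ...)` find;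
-- dict indexing `frags[i]` is getD (the looked-up id is always live) and `list.remove(id)`
-- is List.erase (the id is in the bucket whenever Python reaches the remove)
def pvStepIdx (e : Int × String × String)
    (S : PySem.Dict Int (List String) × PySem.Dict String (List Int) × PySem.Dict String (List Int) × Int) :
    PySem.Dict Int (List String) × PySem.Dict String (List Int) × PySem.Dict String (List Int) × Int :=
  match S.2.2.1.getD e.2.1 [] with
  | [] => S
  | ia :: _ =>
    let fa := S.1.getD ia []
    match (S.2.1.getD e.2.2 []).find? (fun i => S.1.getD i [] ≠ fa) with
    | none => S
    | some ib =>
      let fb := S.1.getD ib []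
      let en1 := S.2.2.1.insert e.2.1 ((S.2.2.1.getD e.2.1 []).erase ia)
      let st1 := S.2.1.insert (PySem.List.pyGetD fa 0 "") ((S.2.1.getD (PySem.List.pyGetD fa 0 "") []).erase ia)
      let st2 := st1.insert e.2.2 ((st1.getD e.2.2 []).erase ib)
      let en2 := en1.insert (PySem.List.pyGetD fb (-1) "") ((en1.getD (PySem.List.pyGetD fb (-1) "") []).erase ib)
      (((S.1.erase ia).erase ib).insert S.2.2.2 (fa ++ fb),
       st2.modify (PySem.List.pyGetD fa 0 "") [] (· ++ [S.2.2.2]),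
       en2.modify (PySem.List.pyGetD fb (-1) "") [] (· ++ [S.2.2.2]),
       S.2.2.2 + 1)

def optimal_report_bleu2_given_words_alt (reports : List String) (words : List String) : String :=
  let S0 := pvInitState words
  let Sf := (pvSortT (pvEntries reports words)).foldl (fun S e => pvStepIdx e S)
    (S0.1, S0.2.1, S0.2.2, (words.length : Int))
  PySem.Str.join " " ((Sf.1.values).flatMap (fun f => f))

-- ===== PRECONDITION & SPEC =====
def Spec_optimal_report_bleu2_given_words (reports : List String) (words : List String) (out : String) : Prop := out = optimal_report_bleu2_given_words_alt reports words
instance (reports : List String) (words : List String) (out : String) : Decidable (Spec_optimal_report_bleu2_given_words reports words out) := by unfold Spec_optimal_report_bleu2_given_words; infer_instance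

-- ===== CLAIM (what is proved, stated in full; the proofs are below) =====
def Claim_equal_optimal_report_bleu2_given_words : Prop := ∀ (reports : List String) (words : List String), Dom_optimal_report_bleu2_given_words reports words → Spec_optimal_report_bleu2_given_words reports words (optimal_report_bleu2_given_words reports words)

-- ===== LEMMAS AND PROOFS =====

-- ########## sorting: pvSortT is determined by the multiset ##########

def pvToL (p : Int × String × String) : Int ×ₗ (String ×ₗ String) := toLex (p.1, toLex (p.2.1, p.2.2))

theorem pvLtT_iff (p q : Int × String × String) : pvLtT p q = true ↔ pvToL p < pvToL q := by
  simp [pvLtT, pvToL, Prod.Lex.lt_iff]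

theorem pvLtT_false_iff (p q : Int × String × String) : pvLtT p q = false ↔ pvToL q ≤ pvToL p := by
  rw [← not_lt, ← pvLtT_iff]; simp

def pvR (p q : Int × String × String) : Prop := pvToL p ≤ pvToL q

theorem pvToL_inj : Function.Injective pvToL := by
  rintro ⟨a1, a2, a3⟩ ⟨b1, b2, b3⟩ h
  simp only [pvToL, toLex_inj, Prod.mk.injEq] at h
  simp [h.1, h.2.1, h.2.2]

theorem pvInsertT_perm (x : Int × String × String) (l : List (Int × String × String)) :
    (pvInsertT x l).Perm (x :: l) := by
  induction l with
  | nil => simp [pvInsertT]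
  | cons y t ih =>
    simp only [pvInsertT]
    split
    · exact List.Perm.refl _
    · exact ((ih.cons y).trans (List.Perm.swap x y t))

theorem pvInsertT_pairwise (x : Int × String × String) (l : List (Int × String × String))
    (h : l.Pairwise pvR) : (pvInsertT x l).Pairwise pvR := by
  induction l with
  | nil => simp [pvInsertT, pvR]
  | cons y t ih =>
    simp only [pvInsertT]
    rcases List.pairwise_cons.mp h with ⟨hy, ht⟩
    by_cases hlt : pvLtT x y = true
    · rw [if_pos hlt]
      refine List.pairwise_cons.mpr ⟨?_, h⟩
      intro z hz
      rcases List.mem_cons.mp hz with hz | hz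
      · rw [hz]; exact le_of_lt (pvLtT_iff x y |>.mp hlt)
      · exact le_trans (le_of_lt (pvLtT_iff x y |>.mp hlt)) (hy _ hz)
    · rw [if_neg hlt]
      refine List.pairwise_cons.mpr ⟨?_, ih ht⟩
      intro z hz
      have hz' := (pvInsertT_perm x t).mem_iff.mp hz
      rcases List.mem_cons.mp hz' with hz' | hz'
      · rw [hz']
        exact pvLtT_false_iff x y |>.mp (Bool.eq_false_iff.mpr hlt)
      · exact hy _ hz'

theorem pvSortT_perm (l : List (Int × String × String)) : (pvSortT l).Perm l := by
  suffices h : ∀ (l acc : List (Int × String × String)),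
      (l.foldl (fun acc e => pvInsertT e acc) acc).Perm (acc ++ l) by
    simpa using h l []
  intro l
  induction l with
  | nil => simp
  | cons e t ih =>
    intro acc
    simp only [List.foldl_cons]
    refine (ih (pvInsertT e acc)).trans ?_
    have : (pvInsertT e acc ++ t).Perm ((e :: acc) ++ t) :=
      (pvInsertT_perm e acc).append_right t
    refine this.trans ?_
    simp only [List.cons_append]
    exact (List.perm_middle).symm

theorem pvSortT_pairwise (l : List (Int × String × String)) : (pvSortT l).Pairwise pvR := by
  suffices h : ∀ (l acc : List (Int × String × String)), acc.Pairwise pvR →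
      (l.foldl (fun acc e => pvInsertT e acc) acc).Pairwise pvR by
    exact h l [] (by simp)
  intro l
  induction l with
  | nil => intro acc h; simpa using h
  | cons e t ih =>
    intro acc h
    exact ih _ (pvInsertT_pairwise e acc h)

theorem pvSortT_eq_of_perm {l₁ l₂ : List (Int × String × String)} (h : l₁.Perm l₂) :
    pvSortT l₁ = pvSortT l₂ := by
  have hp : (pvSortT l₁).Perm (pvSortT l₂) := (pvSortT_perm l₁).trans (h.trans (pvSortT_perm l₂).symm)
  exact hp.eq_of_pairwise (fun a b _ _ hab hba => pvToL_inj (le_antisymm hab hba))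
    (pvSortT_pairwise l₁) (pvSortT_pairwise l₂)

-- ########## the canonical candidate multiset ##########

def pvBigrams (ws : List String) : List (String × String) :=
  (List.range (ws.length - 1)).map (fun j => (ws.getD j "", ws.getD (j + 1) ""))

def pvBG (r : String) : List (String × String) := pvBigrams (PySem.Str.split₀ r)

def pvNrep (r : String) (w : String × String) : Nat := (pvBG r).count w

def pvCnt (reports : List String) (w : String × String) (k : Nat) : Nat :=
  reports.countP (fun r => decide (k ≤ pvNrep r w))

def pvWmax (reports : List String) (w : String × String) : Nat :=
  (reports.map (fun r => pvNrep r w)).foldr max 0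

def pvMs (reports : List String) (w : String × String) : List Int :=
  reports.filterMap (fun r => if 0 < pvNrep r w then some ((pvNrep r w : Int)) else none)

def pvK (reports : List String) : List (String × String) :=
  PySem.Set.ofList (reports.flatMap pvBG)

def pvCanon (reports : List String) (w : String × String) : List (Int × String × String) :=
  (List.range (pvWmax reports w)).map (fun i => (-(pvCnt reports w (i + 1) : Int), w.1, w.2))

def pvP (words : List String) (w : String × String) : Bool :=
  words.contains w.1 && words.contains w.2

def pvCanonAll (reports words : List String) : List (Int × String × String) :=
  ((pvK reports).filter (pvP words)).flatMap (pvCanon reports)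

-- small helpers about foldr max
theorem pv_le_foldr_max {l : List Nat} {x : Nat} (h : x ∈ l) : x ≤ l.foldr max 0 := by
  induction l with
  | nil => simp at h
  | cons y t ih =>
    rcases List.mem_cons.mp h with h | h
    · subst h; exact le_max_left _ _
    · exact le_trans (ih h) (le_max_right _ _)

theorem pv_foldr_max_mem (l : List Nat) : l.foldr max 0 = 0 ∨ l.foldr max 0 ∈ l := by
  induction l with
  | nil => left; rfl
  | cons y t ih =>
    simp only [List.foldr_cons]
    rcases Nat.le_total y (t.foldr max 0) with h | h
    · rw [max_eq_right h]
      rcases ih with h0 | hm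
      · left; exact h0
      · right; exact List.mem_cons_of_mem _ hm
    · rw [max_eq_left h]
      right; exact List.mem_cons_self

theorem pv_le_wmax_iff {reports : List String} {w : String × String} {k : Nat} (hk : 0 < k) :
    k ≤ pvWmax reports w ↔ ∃ r ∈ reports, k ≤ pvNrep r w := by
  constructor
  · intro h
    rcases pv_foldr_max_mem (reports.map (fun r => pvNrep r w)) with h0 | hm
    · rw [pvWmax] at h; omega
    · rcases List.mem_map.mp hm with ⟨r, hr, hrv⟩
      exact ⟨r, hr, by rw [hrv]; exact h⟩
  · rintro ⟨r, hr, hkr⟩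
    exact le_trans hkr (pv_le_foldr_max (List.mem_map.mpr ⟨r, hr, rfl⟩))

-- ########## A side: its entry list is a permutation of pvCanonAll ##########

def pvKA (L : List (String × String)) : List ((String × String) × Int) :=
  (PySem.Set.ofList L).flatMap (fun w => (List.range (L.count w)).map (fun (i : Nat) => (w, (i : Int))))

def pvKAall (rs : List String) : List ((String × String) × Int) :=
  rs.flatMap (fun r => pvKA (pvBG r))

theorem pvNgrams2_eq (r : String) :
    pvNgrams2 r = PySem.Dict.counter (pvBG r) := by
  unfold pvNgrams2 pvBG pvBigrams
  rw [PySem.Dict.counter_eq_foldl, PySem.List.pyRange_one]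
  have h : (((PySem.Str.split₀ r).length : Int) - 2 + 1 - 0).toNat
      = (PySem.Str.split₀ r).length - 1 := by omega
  rw [h, List.foldl_map, List.foldl_map]
  apply PySem.List.foldl_congr_mem
  intro acc k _
  have h2 : ((k : Int) + 1) = (((k + 1 : Nat)) : Int) := by push_cast; ring
  simp only [zero_add, h2, PySem.List.pyGetD_natCast]

theorem pvPerReportA (L : List (String × String)) (t : PySem.Dict ((String × String) × Int) Int) :
    ((PySem.Dict.counter L).items).foldl
      (fun t wc => (PySem.List.pyRange 0 wc.2 1).foldl
        (fun t i => t.modify (wc.1, i) 0 (· + 1)) t) t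
    = (pvKA L).foldl (fun t k => t.modify k 0 (· + 1)) t := by
  rw [PySem.Dict.items_counter, List.foldl_map, pvKA, List.foldl_flatMap]
  apply PySem.List.foldl_congr_mem
  intro t' w _
  rw [PySem.List.pyRange_zero_nat, List.foldl_map, List.foldl_map]

theorem pvBuildCountTable_eq (rs : List String) :
    pvBuildCountTable (rs.map (fun r => pvNgrams2 r))
      = (pvKAall rs).foldl (fun t k => t.modify k 0 (· + 1)) PySem.Dict.empty := by
  unfold pvBuildCountTable pvKAall
  rw [List.foldl_map, List.foldl_flatMap]
  apply PySem.List.foldl_congr_mem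
  intro t r _
  rw [pvNgrams2_eq, pvPerReportA]

theorem pv_count_flatMap {α β : Type} [BEq β] (l : List α) (g : α → List β) (v : β) :
    (l.flatMap g).count v = (l.map (fun x => (g x).count v)).sum := by
  induction l with
  | nil => simp
  | cons r t ih => simp [List.flatMap_cons, List.count_append, ih]

theorem pv_map_indicator_sum (S : List (String × String)) (hS : S.Nodup) (w : String × String)
    (g : String × String → Nat) :
    (S.map (fun x => if x = w then g x else 0)).sum = if w ∈ S then g w else 0 := by
  induction S with
  | nil => simp
  | cons x t ih =>
    rcases List.nodup_cons.mp hS with ⟨hx, ht⟩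
    by_cases hxw : x = w
    · subst hxw
      have hz : (t.map (fun y => if y = x then g y else 0)).sum = 0 := by
        apply List.sum_eq_zero
        intro n hn
        rcases List.mem_map.mp hn with ⟨y, hy, hyn⟩
        have hyx : ¬ y = x := fun h => hx (h ▸ hy)
        rw [if_neg hyx] at hyn
        omega
      simp [hz]
    · have hwx : ¬ w = x := fun h => hxw h.symm
      simp only [List.map_cons, List.sum_cons, if_neg hxw, ih ht, List.mem_cons, zero_add]
      by_cases hw : w ∈ t <;> simp [hw, hwx]

theorem pvKA_count (L : List (String × String)) (w : String × String) (i : Int) :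
    (pvKA L).count (w, i) = if 0 ≤ i ∧ i < (L.count w : Int) then 1 else 0 := by
  rw [pvKA, pv_count_flatMap]
  have hinner : ∀ x : String × String,
      ((List.range (L.count x)).map (fun (n : Nat) => (x, (n : Int)))).count (w, i)
        = if x = w then (if 0 ≤ i ∧ i < (L.count x : Int) then 1 else 0) else 0 := by
    intro x
    by_cases hxw : x = w
    · subst hxw
      rw [if_pos rfl]
      by_cases hi : 0 ≤ i
      · obtain ⟨m, rfl⟩ : ∃ m : Nat, i = (m : Int) := ⟨i.toNat, (Int.toNat_of_nonneg hi).symm⟩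
        have hinj : Function.Injective (fun (n : Nat) => ((x, (n : Int)) : (String × String) × Int)) := by
          intro a b hab
          simpa using hab
        rw [List.count_map_of_injective _ _ hinj, List.count_range]
        split_ifs <;> omega
      · have hmemno : (x, i) ∉ (List.range (L.count x)).map (fun (n : Nat) => (x, (n : Int))) := by
          intro hmem
          rcases List.mem_map.mp hmem with ⟨n, _, hn⟩
          have h2 : (n : Int) = i := (Prod.ext_iff.mp hn).2
          omega
        rw [List.count_eq_zero.mpr hmemno, if_neg (fun h => hi h.1)]
    · rw [if_neg hxw]
      apply List.count_eq_zero.mpr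
      intro hmem
      rcases List.mem_map.mp hmem with ⟨n, _, hn⟩
      exact hxw (Prod.ext_iff.mp hn).1
  rw [List.map_congr_left (fun x _ => hinner x), pv_map_indicator_sum _ (PySem.Set.nodup_ofList L) w]
  by_cases hw : w ∈ L
  · simp [PySem.Set.mem_ofList, hw]
  · have hc : L.count w = 0 := List.count_eq_zero.mpr hw
    have hw' : w ∉ PySem.Set.ofList L := fun h => hw ((PySem.Set.mem_ofList L w).mp h)
    rw [if_neg hw', hc]
    split_ifs with h
    · exfalso; push_cast at h; omega
    · rfl

theorem pvKAall_count (rs : List String) (w : String × String) (i : Int) (hi : 0 ≤ i) :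
    (pvKAall rs).count (w, i) = pvCnt rs w (i.toNat + 1) := by
  rw [pvKAall, pv_count_flatMap, pvCnt]
  rw [← PySem.List.sum_map_ite_one_zero_nat (fun r => decide (i.toNat + 1 ≤ pvNrep r w)) rs]
  congr 1
  apply List.map_congr_left
  intro r _
  rw [pvKA_count]
  have : (pvBG r).count w = pvNrep r w := rfl
  rw [this]
  split_ifs with h1 h2 h2 <;> simp_all <;> omega

theorem pv_mem_pvKA (L : List (String × String)) (w : String × String) (i : Int) :
    (w, i) ∈ pvKA L ↔ 0 ≤ i ∧ i.toNat < L.count w := by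
  unfold pvKA
  rw [List.mem_flatMap]
  constructor
  · rintro ⟨x, _, hmem⟩
    rcases List.mem_map.mp hmem with ⟨n, hn, heq⟩
    obtain ⟨hx, hi⟩ := Prod.mk.injEq .. ▸ heq
    subst hx
    rw [List.mem_range] at hn
    omega
  · rintro ⟨h0, hlt⟩
    refine ⟨w, ?_, List.mem_map.mpr ⟨i.toNat, List.mem_range.mpr hlt, by simp [Int.toNat_of_nonneg h0]⟩⟩
    rw [PySem.Set.mem_ofList]
    exact List.count_pos_iff.mp (by omega)

theorem pv_mem_pvKAall (rs : List String) (w : String × String) (i : Int) :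
    (w, i) ∈ pvKAall rs ↔ 0 ≤ i ∧ i.toNat < pvWmax rs w := by
  unfold pvKAall
  rw [List.mem_flatMap]
  constructor
  · rintro ⟨r, hr, hmem⟩
    rcases (pv_mem_pvKA _ _ _).mp hmem with ⟨h0, hlt⟩
    have : i.toNat + 1 ≤ pvWmax rs w :=
      (pv_le_wmax_iff (by omega)).mpr ⟨r, hr, by unfold pvNrep; omega⟩
    omega
  · rintro ⟨h0, hlt⟩
    have hw : i.toNat + 1 ≤ pvWmax rs w := by omega
    rcases (pv_le_wmax_iff (show 0 < i.toNat + 1 by omega)).mp hw with ⟨r, hr, hle⟩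
    exact ⟨r, hr, (pv_mem_pvKA _ _ _).mpr ⟨h0, by unfold pvNrep at hle; omega⟩⟩

-- table facts (getD / keys) in canonical terms
theorem pv_tableA_getD (rs : List String) (k : (String × String) × Int) :
    (pvBuildCountTable (rs.map (fun r => pvNgrams2 r))).getD k 0 = ((pvKAall rs).count k : Int) := by
  rw [pvBuildCountTable_eq, PySem.Dict.getD_foldl_modify_add_one]
  simp [PySem.Dict.getD_empty]

theorem pv_tableA_keys (rs : List String) :
    (pvBuildCountTable (rs.map (fun r => pvNgrams2 r))).keys = PySem.Set.ofList (pvKAall rs) := by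
  rw [pvBuildCountTable_eq, PySem.Dict.keys_foldl_modify, PySem.Dict.keys_empty,
    PySem.Set.update_nil_left]

theorem pv_tableA_nodup (rs : List String) :
    (pvBuildCountTable (rs.map (fun r => pvNgrams2 r))).keys.Nodup := by
  rw [pv_tableA_keys]; exact PySem.Set.nodup_ofList _

-- the canonical key list, and its nodup
def pvKflatA (rs : List String) : List ((String × String) × Int) :=
  (pvK rs).flatMap (fun w => (List.range (pvWmax rs w)).map (fun (i : Nat) => (w, (i : Int))))

theorem pvKflatA_nodup (rs : List String) : (pvKflatA rs).Nodup := by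
  unfold pvKflatA
  rw [List.nodup_flatMap]
  constructor
  · intro w _
    have hf : Function.Injective (fun (i : Nat) => ((w, (i : Int)) : (String × String) × Int)) := by
      intro a b hab; simpa using hab
    exact List.nodup_range.map hf
  · refine (PySem.Set.nodup_ofList _).imp ?_
    intro w1 w2 hne
    intro p hp1 hp2
    rcases List.mem_map.mp hp1 with ⟨n1, _, h1⟩
    rcases List.mem_map.mp hp2 with ⟨n2, _, h2⟩
    have e1 : p.1 = w1 := by rw [← h1]
    have e2 : p.1 = w2 := by rw [← h2]
    exact hne (by rw [← e1, ← e2])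

theorem pv_mem_pvK_iff (rs : List String) (w : String × String) :
    w ∈ pvK rs ↔ 0 < pvWmax rs w := by
  rw [pvK, PySem.Set.mem_ofList, List.mem_flatMap]
  rw [show (0 < pvWmax rs w) ↔ 1 ≤ pvWmax rs w by omega, pv_le_wmax_iff (by omega)]
  constructor
  · rintro ⟨r, hr, hm⟩
    exact ⟨r, hr, by unfold pvNrep; exact List.count_pos_iff.mpr hm⟩
  · rintro ⟨r, hr, hm⟩
    exact ⟨r, hr, List.count_pos_iff.mp (by unfold pvNrep at hm; omega)⟩

theorem pv_mem_pvKflatA (rs : List String) (w : String × String) (i : Int) :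
    (w, i) ∈ pvKflatA rs ↔ 0 ≤ i ∧ i.toNat < pvWmax rs w := by
  unfold pvKflatA
  rw [List.mem_flatMap]
  constructor
  · rintro ⟨x, hx, hmem⟩
    rcases List.mem_map.mp hmem with ⟨n, hn, heq⟩
    have hxw : x = w := by have := congrArg Prod.fst heq; simpa using this
    have hiw : (n : Int) = i := by have := congrArg Prod.snd heq; simpa using this
    rw [List.mem_range] at hn
    subst hxw
    omega
  · rintro ⟨h0, hlt⟩
    refine ⟨w, (pv_mem_pvK_iff rs w).mpr (by omega),
      List.mem_map.mpr ⟨i.toNat, List.mem_range.mpr hlt, by simp [Int.toNat_of_nonneg h0]⟩⟩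

theorem pv_keysA_perm (rs : List String) :
    (pvBuildCountTable (rs.map (fun r => pvNgrams2 r))).keys.Perm (pvKflatA rs) := by
  rw [pv_tableA_keys]
  refine (List.perm_ext_iff_of_nodup (PySem.Set.nodup_ofList _) (pvKflatA_nodup rs)).mpr ?_
  rintro ⟨w, i⟩
  rw [PySem.Set.mem_ofList, pv_mem_pvKAall, pv_mem_pvKflatA]

theorem pv_filter_flatMap {α β : Type} (l : List α) (f : α → List β) (q : β → Bool) (p : α → Bool)
    (h : ∀ a ∈ l, (f a).filter q = if p a then f a else []) :
    (l.flatMap f).filter q = (l.filter p).flatMap f := by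
  induction l with
  | nil => rfl
  | cons x t ih =>
    have iht := ih (fun a ha => h a (List.mem_cons_of_mem _ ha))
    rw [List.flatMap_cons, List.filter_append, h x List.mem_cons_self, List.filter_cons]
    by_cases hp : p x = true
    · rw [if_pos hp, if_pos hp, List.flatMap_cons, iht]
    · rw [if_neg hp, if_neg hp, iht, List.nil_append]

-- A's entry list (the heap contents before sorting) is a permutation of pvCanonAll
theorem pv_entriesA_perm (rs words : List String) :
    (((pvBuildCountTable (rs.map (fun r => pvNgrams2 r))).items.filter
        (fun kc => words.contains kc.1.1.1 && words.contains kc.1.1.2)).map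
      (fun kc => (-kc.2, kc.1.1.1, kc.1.1.2))).Perm (pvCanonAll rs words) := by
  have hnd := pv_tableA_nodup rs
  have hitems := PySem.Dict.items_eq_map_keys (pvBuildCountTable (rs.map (fun r => pvNgrams2 r))) hnd 0
  have hperm : (pvBuildCountTable (rs.map (fun r => pvNgrams2 r))).items.Perm
      ((pvKflatA rs).map (fun k => (k, (pvBuildCountTable (rs.map (fun r => pvNgrams2 r))).getD k 0))) := by
    rw [hitems]
    exact (pv_keysA_perm rs).map _
  refine ((hperm.filter _).map _).trans ?_
  rw [List.filter_map, List.map_map]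
  have hfil : (pvKflatA rs).filter ((fun kc => words.contains kc.1.1.1 && words.contains kc.1.1.2)
        ∘ (fun k => (k, (pvBuildCountTable (rs.map (fun r => pvNgrams2 r))).getD k 0)))
      = ((pvK rs).filter (pvP words)).flatMap
          (fun w => (List.range (pvWmax rs w)).map (fun (i : Nat) => (w, (i : Int)))) := by
    unfold pvKflatA
    refine pv_filter_flatMap _ _ _ _ ?_
    intro w _
    by_cases hp : pvP words w = true
    · rw [if_pos hp]
      refine List.filter_eq_self.mpr ?_
      intro p hp2
      rcases List.mem_map.mp hp2 with ⟨n, _, hn⟩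
      subst hn
      simpa [Function.comp, pvP] using hp
    · rw [if_neg hp]
      refine List.filter_eq_nil_iff.mpr ?_
      intro p hp2
      rcases List.mem_map.mp hp2 with ⟨n, _, hn⟩
      subst hn
      simpa [Function.comp, pvP] using hp
  rw [hfil, List.map_flatMap]
  have hin : (fun w => ((List.range (pvWmax rs w)).map (fun (i : Nat) => (w, (i : Int)))).map
        ((fun kc => (-kc.2, kc.1.1.1, kc.1.1.2))
          ∘ (fun k => (k, (pvBuildCountTable (rs.map (fun r => pvNgrams2 r))).getD k 0))))
      = pvCanon rs := by
    funext w
    rw [List.map_map, pvCanon]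
    refine List.map_congr_left ?_
    intro i _
    simp only [Function.comp]
    rw [pv_tableA_getD, pvKAall_count rs w (i : Int) (by positivity)]
    simp
  rw [hin]
  exact List.Perm.refl _

-- ########## B side: pvEntries is a permutation of pvCanonAll ##########

theorem pvLocal_eq (ws : List String) :
    pvLocal ws = PySem.Dict.counter (pvBigrams ws) := by
  unfold pvLocal
  rw [← PySem.Dict.foldl_insert_getD_add_one_eq_counter]
  unfold pvBigrams
  rw [PySem.List.pyRange_one]
  have h : (((ws.length : Int) - 1) - 0).toNat = ws.length - 1 := by omega
  rw [h, List.foldl_map, List.foldl_map]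
  apply PySem.List.foldl_congr_mem
  intro acc k _
  have h2 : ((k : Int) + 1) = (((k + 1 : Nat)) : Int) := by push_cast; ring
  simp only [zero_add, h2, PySem.List.pyGetD_natCast]

theorem pv_filter_beq_of_nodup (S : List (String × String)) (hS : S.Nodup) (w : String × String) :
    S.filter (fun x => x == w) = if w ∈ S then [w] else [] := by
  induction S with
  | nil => simp
  | cons x t ih =>
    rcases List.nodup_cons.mp hS with ⟨hx, ht⟩
    rw [List.filter_cons]
    by_cases hxw : x = w
    · subst hxw
      have ht0 : t.filter (fun y => y == x) = [] := by
        refine List.filter_eq_nil_iff.mpr ?_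
        intro y hy
        have hyx : y ≠ x := fun h => hx (h ▸ hy)
        simpa using hyx
      simp [ht0]
    · have : (x == w) = false := by simpa using hxw
      rw [this]
      simp only [Bool.false_eq_true, if_false, ih ht, List.mem_cons]
      have hwx : ¬ w = x := fun h => hxw h.symm
      by_cases hw : w ∈ t <;> simp [hw, hwx]

-- the values appended to per[w] by one report
theorem pv_report_contrib (r : String) (w : String × String) (d : PySem.Dict (String × String) (List Int)) :
    ((pvLocal (PySem.Str.split₀ r)).items.foldl
        (fun per bm => per.modify bm.1 [] (· ++ [bm.2])) d).getD w []
      = d.getD w [] ++ (if 0 < pvNrep r w then [(pvNrep r w : Int)] else []) := by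
  rw [PySem.Dict.getD_foldl_modify_append]
  congr 1
  rw [pvLocal_eq, PySem.Dict.items_counter]
  rw [List.filter_map, List.map_map]
  have hc : ((fun (p : (String × String) × Int) => p.1 == w)
      ∘ (fun k => (k, ((pvBigrams (PySem.Str.split₀ r)).count k : Int)))) = fun k => k == w := rfl
  rw [hc, pv_filter_beq_of_nodup _ (PySem.Set.nodup_ofList _) w]
  have hmem : w ∈ PySem.Set.ofList (pvBigrams (PySem.Str.split₀ r)) ↔ 0 < pvNrep r w := by
    rw [PySem.Set.mem_ofList]
    unfold pvNrep pvBG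
    exact ⟨fun h => List.count_pos_iff.mpr h, fun h => List.count_pos_iff.mp h⟩
  by_cases h : 0 < pvNrep r w
  · rw [if_pos (hmem.mpr h), if_pos h]
    simp [pvNrep, pvBG]
  · rw [if_neg (fun hh => h (hmem.mp hh)), if_neg h]
    simp

theorem pvPer_getD_gen (reports : List String) (w : String × String) :
    ∀ d : PySem.Dict (String × String) (List Int),
    (reports.foldl (fun per r => (pvLocal (PySem.Str.split₀ r)).items.foldl
        (fun per bm => per.modify bm.1 [] (· ++ [bm.2])) per) d).getD w []
    = d.getD w [] ++ pvMs reports w := by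
  induction reports with
  | nil => intro d; simp [pvMs]
  | cons r t ih =>
    intro d
    rw [List.foldl_cons, ih, pv_report_contrib]
    have : pvMs (r :: t) w = (if 0 < pvNrep r w then [(pvNrep r w : Int)] else []) ++ pvMs t w := by
      unfold pvMs
      rw [List.filterMap_cons]
      by_cases h : 0 < pvNrep r w <;> simp [h]
    rw [this, List.append_assoc]

theorem pvPer_getD (reports : List String) (w : String × String) :
    (pvPer reports).getD w [] = pvMs reports w := by
  unfold pvPer
  rw [pvPer_getD_gen]
  simp [PySem.Dict.getD_empty]

theorem pvPer_nodup (reports : List String) : (pvPer reports).keys.Nodup := by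
  unfold pvPer
  suffices h : ∀ d : PySem.Dict (String × String) (List Int), d.keys.Nodup →
      (reports.foldl (fun per r => (pvLocal (PySem.Str.split₀ r)).items.foldl
        (fun per bm => per.modify bm.1 [] (· ++ [bm.2])) per) d).keys.Nodup by
    exact h _ (by simp [PySem.Dict.keys_empty])
  induction reports with
  | nil => intro d hd; exact hd
  | cons r t ih =>
    intro d hd
    rw [List.foldl_cons]
    exact ih _ (PySem.Dict.nodup_keys_foldl_modify_key _ Prod.fst [] (fun _ bm v => v ++ [bm.2]) d hd)

theorem pv_mem_update {α : Type} [BEq α] [LawfulBEq α] (s : PySem.Set α) (xs : List α) (y : α) :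
    y ∈ PySem.Set.update s xs ↔ y ∈ s ∨ y ∈ xs := by
  rw [PySem.Set.update_eq_append_filter, List.mem_append, List.mem_filter]
  constructor
  · rintro (h | ⟨h, _⟩)
    · exact Or.inl h
    · exact Or.inr ((PySem.Set.mem_ofList _ _).mp h)
  · rintro (h | h)
    · exact Or.inl h
    · by_cases hs : y ∈ s
      · exact Or.inl hs
      · refine Or.inr ⟨(PySem.Set.mem_ofList _ _).mpr h, ?_⟩
        simp [PySem.Set.contains, hs]

theorem pvPer_mem_keys (reports : List String) (w : String × String) :
    w ∈ (pvPer reports).keys ↔ w ∈ pvK reports := by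
  unfold pvPer
  have h : ∀ d : PySem.Dict (String × String) (List Int),
      (w ∈ (reports.foldl (fun per r => (pvLocal (PySem.Str.split₀ r)).items.foldl
        (fun per bm => per.modify bm.1 [] (· ++ [bm.2])) per) d).keys
      ↔ w ∈ d.keys ∨ ∃ r ∈ reports, w ∈ pvBG r) := by
    induction reports with
    | nil => intro d; simp
    | cons r t ih =>
      intro d
      rw [List.foldl_cons, ih]
      have hkeys : ((pvLocal (PySem.Str.split₀ r)).items.foldl
          (fun per bm => per.modify bm.1 [] (· ++ [bm.2])) d).keys
          = PySem.Set.update d.keys ((pvLocal (PySem.Str.split₀ r)).items.map Prod.fst) := by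
        exact PySem.Dict.keys_foldl_modify_key _ Prod.fst [] (fun _ bm v => v ++ [bm.2]) d
      rw [hkeys, pv_mem_update]
      have hmf : w ∈ (pvLocal (PySem.Str.split₀ r)).items.map Prod.fst ↔ w ∈ pvBG r := by
        rw [pvLocal_eq, PySem.Dict.items_counter, List.map_map]
        have : ((Prod.fst ∘ fun k => (k, ((pvBigrams (PySem.Str.split₀ r)).count k : Int)))) = id := rfl
        rw [this, List.map_id, PySem.Set.mem_ofList]
        exact Iff.rfl
      rw [hmf]
      constructor
      · rintro ((h | h) | h)
        · exact Or.inl h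
        · exact Or.inr ⟨r, List.mem_cons_self, h⟩
        · rcases h with ⟨r', hr', hw⟩
          exact Or.inr ⟨r', List.mem_cons_of_mem _ hr', hw⟩
      · rintro (h | ⟨r', hr', hw⟩)
        · exact Or.inl (Or.inl h)
        · rcases List.mem_cons.mp hr' with h' | h'
          · subst h'; exact Or.inl (Or.inr hw)
          · exact Or.inr ⟨r', h', hw⟩
  rw [h PySem.Dict.empty]
  rw [pvK, PySem.Set.mem_ofList, List.mem_flatMap]
  simp [PySem.Dict.keys_empty]

-- counting in pvMs is counting reports
theorem pv_countP_pvMs (reports : List String) (w : String × String) (k : Nat) (hk : 0 < k) :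
    (pvMs reports w).countP (fun m => decide ((k : Int) ≤ m)) = pvCnt reports w k := by
  induction reports with
  | nil => simp [pvMs, pvCnt]
  | cons r t ih =>
    have hms : pvMs (r :: t) w = (if 0 < pvNrep r w then [(pvNrep r w : Int)] else []) ++ pvMs t w := by
      unfold pvMs
      rw [List.filterMap_cons]
      by_cases h : 0 < pvNrep r w <;> simp [h]
    rw [hms, List.countP_append, ih, show pvCnt (r :: t) w k = (if k ≤ pvNrep r w then 1 else 0) + pvCnt t w k by
      rw [pvCnt, pvCnt, List.countP_cons]; by_cases h2 : k ≤ pvNrep r w <;> simp [h2] <;> omega]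
    by_cases h : 0 < pvNrep r w
    · rw [if_pos h]
      have h1 : List.countP (fun m => decide ((k : Int) ≤ m)) [(pvNrep r w : Int)]
          = if k ≤ pvNrep r w then 1 else 0 := by
        by_cases h2 : k ≤ pvNrep r w
        · simp [h2]
        · simp [h2]
      rw [h1]
    · rw [if_neg h]
      have h2 : ¬ k ≤ pvNrep r w := by omega
      simp [h2]

-- max(ms) is pvWmax
theorem pv_max_pvMs (reports : List String) (w : String × String) (hw : w ∈ pvK reports) :
    (PySem.List.max? (pvMs reports w) (fun y => y)).getD 0 = (pvWmax reports w : Int) := by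
  have hw0 : 0 < pvWmax reports w := (pv_mem_pvK_iff reports w).mp hw
  have hmem : (pvWmax reports w : Int) ∈ pvMs reports w := by
    rcases pv_foldr_max_mem (reports.map (fun r => pvNrep r w)) with h0 | hm
    · rw [pvWmax] at hw0 ⊢; omega
    · rcases List.mem_map.mp hm with ⟨r, hr, hrv⟩
      unfold pvMs
      refine List.mem_filterMap.mpr ⟨r, hr, ?_⟩
      rw [show (reports.map (fun r => pvNrep r w)).foldr max 0 = pvWmax reports w from rfl] at hrv
      rw [if_pos (by omega), hrv]
  have hub : ∀ y ∈ pvMs reports w, y ≤ (pvWmax reports w : Int) := by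
    intro y hy
    rcases List.mem_filterMap.mp hy with ⟨r, hr, hry⟩
    by_cases h : 0 < pvNrep r w
    · rw [if_pos h] at hry
      have := pv_le_foldr_max (List.mem_map.mpr ⟨r, hr, rfl⟩ :
        pvNrep r w ∈ reports.map (fun r => pvNrep r w))
      rw [← Option.some.inj hry]
      rw [pvWmax]
      exact_mod_cast this
    · rw [if_neg h] at hry; cases hry
  cases hmax : PySem.List.max? (pvMs reports w) (fun y => y) with
  | none =>
    rw [PySem.List.max?_eq_none_iff] at hmax
    rw [hmax] at hmem
    cases hmem
  | some m =>
    have hm1 : m ∈ pvMs reports w := PySem.List.max?_mem hmax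
    have hm2 := PySem.List.max?_isMax hmax
    have h1 : m ≤ (pvWmax reports w : Int) := hub m hm1
    have h2 : (pvWmax reports w : Int) ≤ m := hm2 _ hmem
    simp [le_antisymm h1 h2]

-- fold-with-append rewriting for pvEntries
theorem pv_foldl_append_if_list {α β : Type} (p : α → Bool) (g : α → List β) (l : List α) :
    ∀ acc : List β,
    l.foldl (fun acc x => if p x then acc ++ g x else acc) acc = acc ++ (l.filter p).flatMap g := by
  induction l with
  | nil => intro acc; simp
  | cons x t ih =>
    intro acc
    rw [List.foldl_cons, List.filter_cons]
    by_cases hp : p x = true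
    · rw [if_pos hp, if_pos hp, ih, List.flatMap_cons, List.append_assoc]
    · rw [if_neg hp, if_neg hp, ih]

theorem pv_entriesB_perm (rs words : List String) :
    (pvEntries rs words).Perm (pvCanonAll rs words) := by
  have hfun : (fun (es : List (Int × String × String)) (kms : (String × String) × List Int) =>
      if PySem.Set.contains (PySem.Set.ofList words) kms.1.1 &&
         PySem.Set.contains (PySem.Set.ofList words) kms.1.2 then
        (PySem.List.pyRange 1 ((PySem.List.max? kms.2 (fun y => y)).getD 0 + 1) 1).foldl
          (fun es2 k => es2 ++ [(-(pvCntGe kms.2 k), kms.1.1, kms.1.2)]) es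
      else es)
    = (fun es kms =>
      if PySem.Set.contains (PySem.Set.ofList words) kms.1.1 &&
         PySem.Set.contains (PySem.Set.ofList words) kms.1.2 then
        es ++ (PySem.List.pyRange 1 ((PySem.List.max? kms.2 (fun y => y)).getD 0 + 1) 1).map
          (fun k => (-(pvCntGe kms.2 k), kms.1.1, kms.1.2))
      else es) := by
    funext es kms
    rw [PySem.List.foldl_append_singleton_eq_map]
  rw [pvEntries, hfun, pv_foldl_append_if_list, List.nil_append]
  have hq : (pvPer rs).items.filter (fun kms =>
        PySem.Set.contains (PySem.Set.ofList words) kms.1.1 &&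
        PySem.Set.contains (PySem.Set.ofList words) kms.1.2)
      = (pvPer rs).items.filter (fun kms => pvP words kms.1) := by
    refine List.filter_congr ?_
    intro x _
    simp [PySem.Set.contains, pvP]
  rw [hq]
  have hitems : (pvPer rs).items = (pvPer rs).keys.map (fun w => (w, pvMs rs w)) := by
    rw [PySem.Dict.items_eq_map_keys _ (pvPer_nodup rs) []]
    exact List.map_congr_left (fun w _ => by rw [pvPer_getD])
  rw [hitems, List.filter_map, List.flatMap_map]
  have hcomp : ((fun (kms : (String × String) × List Int) => pvP words kms.1)
      ∘ (fun w => (w, pvMs rs w))) = pvP words := rfl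
  rw [hcomp]
  have hinner : ∀ w ∈ (pvPer rs).keys.filter (pvP words),
      (PySem.List.pyRange 1 ((PySem.List.max? (pvMs rs w) (fun y => y)).getD 0 + 1) 1).map
        (fun k => (-(pvCntGe (pvMs rs w) k), w.1, w.2)) = pvCanon rs w := by
    intro w hw
    have hwk : w ∈ pvK rs := (pvPer_mem_keys rs w).mp (List.mem_of_mem_filter hw)
    rw [pv_max_pvMs rs w hwk, PySem.List.pyRange_one]
    have h : ((pvWmax rs w : Int) + 1 - 1).toNat = pvWmax rs w := by omega
    rw [h, List.map_map, pvCanon]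
    refine List.map_congr_left ?_
    intro i _
    simp only [Function.comp]
    have hfold : pvCntGe (pvMs rs w) (1 + (i : Int))
        = ((pvMs rs w).countP (fun m => decide (((i + 1 : Nat) : Int) ≤ m)) : Int) := by
      rw [pvCntGe]
      have hfn : (fun (s : Int) (m : Int) => if 1 + (i : Int) ≤ m then s + 1 else s)
          = (fun s m => if (fun m => decide (((i + 1 : Nat) : Int) ≤ m)) m = true then s + 1 else s) := by
        funext s m
        have : (1 + (i : Int) ≤ m) ↔ (((i + 1 : Nat) : Int) ≤ m) := by push_cast; omega
        by_cases h : 1 + (i : Int) ≤ m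
        · rw [if_pos h, if_pos (by simpa using this.mp h)]
        · rw [if_neg h, if_neg (by simpa using fun hh => h (this.mpr hh))]
      rw [hfn, PySem.List.foldl_count_if, zero_add]
    rw [hfold, pv_countP_pvMs rs w (i + 1) (by omega)]
  have hflat : ((pvPer rs).keys.filter (pvP words)).flatMap
      (fun w => (PySem.List.pyRange 1 ((PySem.List.max? (pvMs rs w) (fun y => y)).getD 0 + 1) 1).map
        (fun k => (-(pvCntGe (pvMs rs w) k), w.1, w.2)))
      = ((pvPer rs).keys.filter (pvP words)).flatMap (pvCanon rs) := by
    rw [List.flatMap, List.flatMap]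
    congr 1
    exact List.map_congr_left hinner
  rw [hflat]
  unfold pvCanonAll
  have hkperm : ((pvPer rs).keys.filter (pvP words)).Perm ((pvK rs).filter (pvP words)) :=
    ((List.perm_ext_iff_of_nodup (pvPer_nodup rs) (PySem.Set.nodup_ofList _)).mpr
      (fun w => pvPer_mem_keys rs w)).filter _
  exact hkperm.flatMap (fun a _ => List.Perm.refl _)

-- ########## the two sorted candidate lists coincide ##########

theorem pv_sorted_entries_eq (reports words : List String) :
    (List.foldl
      (fun heap kc =>
        if (words.contains kc.1.1.1 && words.contains kc.1.1.2) = true then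
          pvInsertT (-kc.2, kc.1.1.1, kc.1.1.2) heap
        else heap)
      [] (pvBuildCountTable (List.map (fun r => pvNgrams2 r) reports)).items)
    = pvSortT (pvEntries reports words) := by
  rw [PySem.List.foldl_if_eq_foldl_filter]
  have hA : (List.filter (fun kc => words.contains kc.1.1.1 && words.contains kc.1.1.2)
        (pvBuildCountTable (List.map (fun r => pvNgrams2 r) reports)).items).foldl
      (fun heap kc => pvInsertT (-kc.2, kc.1.1.1, kc.1.1.2) heap) []
    = pvSortT ((List.filter (fun kc => words.contains kc.1.1.1 && words.contains kc.1.1.2)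
        (pvBuildCountTable (List.map (fun r => pvNgrams2 r) reports)).items).map
      (fun kc => (-kc.2, kc.1.1.1, kc.1.1.2))) := by
    rw [pvSortT, List.foldl_map]
  rw [hA]
  exact pvSortT_eq_of_perm ((pv_entriesA_perm reports words).trans (pv_entriesB_perm reports words).symm)

-- ########## A's join loop as a fold of a find?-based step ##########

def pvStepB (e : Int × String × String) (frags : List (List String)) : List (List String) :=
  match frags.find? (fun f => PySem.List.pyGetD f (-1) "" == e.2.1) with
  | none => frags
  | some fa =>
    match frags.find? (fun f => PySem.List.pyGetD f 0 "" == e.2.2 && f ≠ fa) with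
    | none => frags
    | some fb => ((frags.erase fa).erase fb) ++ [fa ++ fb]

theorem pv_filter_head (p : List String → Bool) (frags : List (List String)) :
    (if (frags.filter p).length == 0 then none
     else some (PySem.List.pyGetD (frags.filter p) 0 [])) = frags.find? p := by
  rw [← List.head?_filter]
  cases h : frags.filter p with
  | nil => simp
  | cons f t => simp [PySem.List.pyGetD_zero_cons]

theorem pv_stepB_noop (e : Int × String × String) (frags : List (List String))
    (h : ¬ frags.length > 1) : pvStepB e frags = frags := by
  match frags with
  | [] => simp [pvStepB]
  | [f] =>
    rw [pvStepB]
    split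
    · rfl
    · rename_i fa hfa
      have hfa' : fa = f := by simpa using List.mem_of_find?_eq_some hfa
      subst hfa'
      split
      · rfl
      · rename_i fb hfb
        have := List.find?_some hfb
        have hm : fb = fa := by simpa using List.mem_of_find?_eq_some hfb
        subst hm
        simp at this
  | f :: g :: t => exact absurd (by simp only [List.length_cons]; omega) h

theorem pv_loopA_noop (l : List (Int × String × String)) (frags : List (List String))
    (h : ¬ frags.length > 1) : pvLoopA l frags = frags := by
  cases l with
  | nil => rfl
  | cons e rest => rw [pvLoopA, if_neg h]

theorem pv_loopA_eq_foldl (l : List (Int × String × String)) :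
    ∀ frags, pvLoopA l frags = l.foldl (fun frags e => pvStepB e frags) frags := by
  induction l with
  | nil => intro frags; rfl
  | cons e rest ih =>
    intro frags
    rw [List.foldl_cons, ← ih]
    by_cases h : frags.length > 1
    · rw [pvLoopA, if_pos h]
      have hp1 := pv_filter_head (fun f => PySem.List.pyGetD f (-1) "" == e.2.1) frags
      by_cases h1 : ((frags.filter (fun f => PySem.List.pyGetD f (-1) "" == e.2.1)).length == 0) = true
      · rw [if_pos h1] at hp1
        rw [if_pos h1, pvStepB, ← hp1]
      · rw [if_neg h1] at hp1
        rw [if_neg h1, pvStepB]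
        split
        · rename_i hfa
          rw [hfa] at hp1
          exact absurd hp1 (by simp)
        · rename_i fa hfa
          rw [hfa] at hp1
          have hfa' : PySem.List.pyGetD (frags.filter (fun f => PySem.List.pyGetD f (-1) "" == e.2.1)) 0 [] = fa :=
            Option.some.inj hp1
          rw [hfa']
          have hp2 := pv_filter_head (fun f => PySem.List.pyGetD f 0 "" == e.2.2 && f ≠ fa) frags
          by_cases h2 : ((frags.filter (fun f => PySem.List.pyGetD f 0 "" == e.2.2 && f ≠ fa)).length == 0) = true
          · rw [if_pos h2] at hp2
            rw [if_pos h2, ← hp2]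
          · rw [if_neg h2] at hp2
            rw [if_neg h2, ← hp2]
    · rw [pv_stepB_noop e frags h, pv_loopA_noop (e :: rest) frags h, pv_loopA_noop rest frags h]

-- ########## the simulation invariant for the indexed join ##########

def pvInv (F : List (List String))
    (S : PySem.Dict Int (List String) × PySem.Dict String (List Int) × PySem.Dict String (List Int) × Int) : Prop :=
  S.1.items.map (·.2) = F ∧
  S.1.items.Pairwise (fun p q => p.1 < q.1) ∧
  (∀ p ∈ S.1.items, p.1 < S.2.2.2) ∧
  (∀ p ∈ S.1.items, p.2 ≠ []) ∧
  (∀ w, S.2.1.getD w [] = (S.1.items.filter (fun p => PySem.List.pyGetD p.2 0 "" == w)).map (·.1)) ∧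
  (∀ w, S.2.2.1.getD w [] = (S.1.items.filter (fun p => PySem.List.pyGetD p.2 (-1) "" == w)).map (·.1))

-- Python indexing at 0 and -1 through ++
theorem pv_pyIdx_neg_one (n : Nat) (h : 0 < n) : PySem.List.pyIdx? n (-1) = some (n - 1) := by
  simp only [PySem.List.pyIdx?]
  rw [if_neg (by omega), if_pos (by omega)]
  norm_num

theorem pv_pyGetD_neg_one_append (l l' : List String) (h : l' ≠ []) :
    PySem.List.pyGetD (l ++ l') (-1) "" = PySem.List.pyGetD l' (-1) "" := by
  have h1 : 0 < l'.length := List.length_pos_iff.mpr h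
  simp only [PySem.List.pyGetD, PySem.List.pyGet?, List.length_append,
    pv_pyIdx_neg_one _ (by omega : 0 < l.length + l'.length), pv_pyIdx_neg_one _ h1]
  simp only [Option.bind_some]
  rw [List.getElem?_append_right (by omega)]
  congr 2
  omega

theorem pv_pyGetD_zero_append (l l' : List String) (h : l ≠ []) :
    PySem.List.pyGetD (l ++ l') 0 "" = PySem.List.pyGetD l 0 "" := by
  cases l with
  | nil => exact absurd rfl h
  | cons x t => rw [List.cons_append, PySem.List.pyGetD_zero_cons, PySem.List.pyGetD_zero_cons]

-- generic list lemmas for the simulation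
theorem pv_find?_filter {α : Type} (l : List α) (q r : α → Bool) :
    (l.filter q).find? r = l.find? (fun x => q x && r x) := by
  induction l with
  | nil => rfl
  | cons x t ih =>
    rw [List.filter_cons]
    by_cases hq : q x = true
    · rw [if_pos hq, List.find?_cons, List.find?_cons]
      cases hr : r x with
      | true => simp [hq, hr]
      | false => simp [hq, hr, ih]
    · rw [if_neg hq, List.find?_cons]
      have : (q x && r x) = false := by simp [hq]
      rw [this, ih]

theorem pv_find?_congr {α : Type} (l : List α) (p q : α → Bool) (h : ∀ x ∈ l, p x = q x) :
    l.find? p = l.find? q := by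
  induction l with
  | nil => rfl
  | cons x t ih =>
    rw [List.find?_cons, List.find?_cons, h x List.mem_cons_self]
    cases hq : q x with
    | true => rfl
    | false => exact ih (fun y hy => h y (List.mem_cons_of_mem _ hy))

theorem pv_key_inj {I : List (Int × List String)} (hnd : (I.map (·.1)).Nodup)
    {p q : Int × List String} (hp : p ∈ I) (hq : q ∈ I) (h : p.1 = q.1) : p = q :=
  List.inj_on_of_nodup_map hnd hp hq h

theorem pv_nodup_split {l1 l2 : List (Int × List String)} {p : Int × List String}
    (hnd : ((l1 ++ p :: l2).map (·.1)).Nodup) :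
    p.1 ∉ l1.map (·.1) ∧ p.1 ∉ l2.map (·.1) := by
  rw [List.map_append, List.map_cons] at hnd
  rcases List.nodup_append.mp hnd with ⟨_, hnd2, hdisj⟩
  rcases List.nodup_cons.mp hnd2 with ⟨hp2, _⟩
  exact ⟨fun hm => (hdisj p.1 hm p.1 List.mem_cons_self) rfl, hp2⟩

theorem pv_filter_key_decomp {l1 l2 : List (Int × List String)} {p : Int × List String}
    (h1 : p.1 ∉ l1.map (·.1)) (h2 : p.1 ∉ l2.map (·.1)) :
    (l1 ++ p :: l2).filter (fun x => !(x.1 == p.1)) = l1 ++ l2 := by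
  rw [List.filter_append, List.filter_cons]
  have hp : (!(p.1 == p.1)) = false := by simp
  rw [hp]
  simp only [Bool.false_eq_true, if_false]
  have e1 : l1.filter (fun x => !(x.1 == p.1)) = l1 :=
    List.filter_eq_self.mpr (fun x hx => by
      simpa using fun hh => h1 (List.mem_map.mpr ⟨x, hx, hh⟩))
  have e2 : l2.filter (fun x => !(x.1 == p.1)) = l2 :=
    List.filter_eq_self.mpr (fun x hx => by
      simpa using fun hh => h2 (List.mem_map.mpr ⟨x, hx, hh⟩))
  rw [e1, e2]

theorem pv_value_erase {l1 l2 : List (Int × List String)} {p : Int × List String}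
    (h : ∀ x ∈ l1, x.2 ≠ p.2) :
    (((l1 ++ p :: l2).map (·.2)).erase p.2) = (l1 ++ l2).map (·.2) := by
  rw [List.map_append, List.map_cons]
  have hnm : p.2 ∉ l1.map (·.2) := by
    intro hm
    rcases List.mem_map.mp hm with ⟨x, hx, hxe⟩
    exact h x hx hxe
  rw [List.erase_append_right _ hnm, List.erase_cons_head, List.map_append]

theorem pv_mapfst_filter_erase (l : List (Int × List String)) (hnd : (l.map (·.1)).Nodup)
    (q : Int × List String → Bool) (k : Int) :
    ((l.filter (fun p => !(p.1 == k))).filter q).map (·.1) = ((l.filter q).map (·.1)).erase k := by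
  induction l with
  | nil => rfl
  | cons x t ih =>
    rw [List.map_cons] at hnd
    rcases List.nodup_cons.mp hnd with ⟨hx, ht⟩
    by_cases hk : x.1 = k
    · have hkeep : (!(x.1 == k)) = false := by simp [hk]
      have hnok : k ∉ t.map (·.1) := hk ▸ hx
      have htf : t.filter (fun p => !(p.1 == k)) = t :=
        List.filter_eq_self.mpr (fun y hy => by
          simpa using fun hh => hnok (List.mem_map.mpr ⟨y, hy, hh⟩))
      rw [List.filter_cons, hkeep]
      simp only [Bool.false_eq_true, if_false]
      rw [htf, List.filter_cons]
      by_cases hq : q x = true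
      · rw [if_pos hq, List.map_cons, hk, List.erase_cons_head]
      · rw [if_neg hq]
        have : k ∉ (t.filter q).map (·.1) := by
          intro hm
          rcases List.mem_map.mp hm with ⟨y, hy, hye⟩
          exact hnok (List.mem_map.mpr ⟨y, List.mem_of_mem_filter hy, hye⟩)
        rw [List.erase_of_not_mem this]
    · have hkeep : (!(x.1 == k)) = true := by simp [hk]
      rw [List.filter_cons, hkeep]
      simp only [if_true]
      rw [List.filter_cons, List.filter_cons]
      by_cases hq : q x = true
      · rw [if_pos hq, if_pos hq, List.map_cons, List.map_cons,
          List.erase_cons_tail (by simpa using hk), ih ht]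
      · rw [if_neg hq, if_neg hq, ih ht]

theorem pv_mem_bucket_iff {I : List (Int × List String)} (hnd : (I.map (·.1)).Nodup)
    {pa : Int × List String} (hpa : pa ∈ I) (q : Int × List String → Bool) :
    pa.1 ∈ (I.filter q).map (·.1) ↔ q pa = true := by
  constructor
  · intro hm
    rcases List.mem_map.mp hm with ⟨p, hp, hpe⟩
    rcases List.mem_filter.mp hp with ⟨hpI, hq⟩
    rwa [pv_key_inj hnd hpI hpa hpe] at hq
  · intro hq
    exact List.mem_map.mpr ⟨pa, List.mem_filter.mpr ⟨hpa, hq⟩, rfl⟩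

-- the endpoint-index dicts after one merge, purely at the dict level
theorem pv_bucket_chain (st : PySem.Dict String (List Int)) (u v c : String) (ia ib n : Int)
    (hia : ∀ w, ia ∈ st.getD w [] → w = u) (hib : ∀ w, ib ∈ st.getD w [] → w = v) (w : String) :
    (((st.insert u ((st.getD u []).erase ia)).insert v
        (((st.insert u ((st.getD u []).erase ia)).getD v []).erase ib)).modify c [] (· ++ [n])).getD w []
      = ((st.getD w []).erase ia).erase ib ++ (if c == w then [n] else []) := by
  have h1 : ∀ w', (st.insert u ((st.getD u []).erase ia)).getD w' [] = (st.getD w' []).erase ia := by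
    intro w'
    rw [PySem.Dict.getD_insert]
    by_cases h : w' = u
    · rw [if_pos h, h]
    · rw [if_neg h, List.erase_of_not_mem (fun hm => h (hia w' hm))]
  have h2 : ∀ w', ((st.insert u ((st.getD u []).erase ia)).insert v
        (((st.insert u ((st.getD u []).erase ia)).getD v []).erase ib)).getD w' []
      = ((st.getD w' []).erase ia).erase ib := by
    intro w'
    rw [PySem.Dict.getD_insert]
    by_cases h : w' = v
    · rw [if_pos h, h1 v, h]
    · rw [if_neg h, h1 w',
        List.erase_of_not_mem (fun hm => h (hib w' (List.mem_of_mem_erase hm)))]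
  rw [PySem.Dict.getD_modify]
  by_cases hw : w = c
  · rw [if_pos hw, h2 c, hw]
    simp
  · rw [if_neg hw, h2 w]
    have : (c == w) = false := by simpa using fun hh => hw hh.symm
    rw [this]
    simp

theorem pv_step_sim (e : Int × String × String) (F : List (List String))
    (S : PySem.Dict Int (List String) × PySem.Dict String (List Int) × PySem.Dict String (List Int) × Int)
    (h : pvInv F S) : pvInv (pvStepB e F) (pvStepIdx e S) := by
  obtain ⟨hvals, hpw, hbound, hne, hst, hen⟩ := h
  have hnd : (S.1.items.map (·.1)).Nodup := by
    refine (List.pairwise_map.mpr hpw).imp ?_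
    exact fun hlt => ne_of_lt hlt
  have hFfind : ∀ (p : List String → Bool),
      F.find? p = (S.1.items.find? (fun x => p x.2)).map (·.2) := by
    intro p
    rw [← hvals, List.find?_map]
    rfl
  cases hea : S.2.2.1.getD e.2.1 [] with
  | nil =>
    have hfilnil : S.1.items.filter (fun p => PySem.List.pyGetD p.2 (-1) "" == e.2.1) = [] := by
      have := hen e.2.1
      rw [hea] at this
      exact List.map_eq_nil_iff.mp this.symm
    have hfindA : F.find? (fun f => PySem.List.pyGetD f (-1) "" == e.2.1) = none := by
      rw [hFfind, ← List.head?_filter, hfilnil]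
      rfl
    have hB : pvStepIdx e S = S := by
      rw [pvStepIdx, hea]
    have hA : pvStepB e F = F := by
      rw [pvStepB, hfindA]
    rw [hA, hB]
    exact ⟨hvals, hpw, hbound, hne, hst, hen⟩
  | cons ia rest =>
    -- the first fragment ending with a
    have hbe := hen e.2.1
    rw [hea] at hbe
    rcases List.map_eq_cons_iff.mp hbe.symm with ⟨pa, lf, hfila, hpafst, _⟩
    have hpam : pa ∈ S.1.items.filter (fun p => PySem.List.pyGetD p.2 (-1) "" == e.2.1) := by
      rw [hfila]; exact List.mem_cons_self
    have hpaI : pa ∈ S.1.items := List.mem_of_mem_filter hpam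
    have hpaφ : (PySem.List.pyGetD pa.2 (-1) "" == e.2.1) = true :=
      (List.mem_filter.mp hpam).2
    have hfindA : F.find? (fun f => PySem.List.pyGetD f (-1) "" == e.2.1) = some pa.2 := by
      rw [hFfind, ← List.head?_filter, hfila]
      rfl
    have hgetDa : S.1.getD ia [] = pa.2 := by
      rw [← hpafst]
      exact PySem.Dict.getD_of_mem_items S.1 (by simpa using hpaI) hnd []
    -- the second find: both sides reduce to the same find? over the items
    have hsb := hst e.2.2
    have hBfind : (S.2.1.getD e.2.2 []).find? (fun i => S.1.getD i [] ≠ pa.2)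
        = (S.1.items.find? (fun x =>
            (PySem.List.pyGetD x.2 0 "" == e.2.2) && decide (x.2 ≠ pa.2))).map (·.1) := by
      rw [hsb, List.find?_map]
      have hcg : (S.1.items.filter (fun p => PySem.List.pyGetD p.2 0 "" == e.2.2)).find?
            ((fun i => decide (S.1.getD i [] ≠ pa.2)) ∘ (·.1))
          = (S.1.items.filter (fun p => PySem.List.pyGetD p.2 0 "" == e.2.2)).find?
            (fun x => decide (x.2 ≠ pa.2)) := by
        refine pv_find?_congr _ _ _ ?_
        intro x hx
        have : S.1.getD x.1 [] = x.2 :=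
          PySem.Dict.getD_of_mem_items S.1 (by simpa using List.mem_of_mem_filter hx) hnd []
        simp [Function.comp, this]
      rw [hcg, pv_find?_filter]
    have hAfind : F.find? (fun f => (PySem.List.pyGetD f 0 "" == e.2.2) && decide (f ≠ pa.2))
        = (S.1.items.find? (fun x =>
            (PySem.List.pyGetD x.2 0 "" == e.2.2) && decide (x.2 ≠ pa.2))).map (·.2) := by
      rw [hFfind]
    cases hfind : S.1.items.find? (fun x =>
        (PySem.List.pyGetD x.2 0 "" == e.2.2) && decide (x.2 ≠ pa.2)) with
    | none =>
      have hB : pvStepIdx e S = S := by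
        rw [pvStepIdx, hea]
        simp only [hgetDa]
        rw [show ((S.2.1.getD e.2.2 []).find? (fun i => S.1.getD i [] ≠ pa.2)) = none by
          rw [hBfind, hfind]; rfl]
      have hA : pvStepB e F = F := by
        rw [pvStepB, hfindA]
        simp only []
        rw [show F.find? (fun f => (PySem.List.pyGetD f 0 "" == e.2.2) && decide (f ≠ pa.2)) = none by
          rw [hAfind, hfind]; rfl]
      rw [hA, hB]
      exact ⟨hvals, hpw, hbound, hne, hst, hen⟩
    | some pb =>
      have hpbI : pb ∈ S.1.items := List.mem_of_find?_eq_some hfind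
      have hpbprop := List.find?_some hfind
      have hpbφ : (PySem.List.pyGetD pb.2 0 "" == e.2.2) = true := by
        exact (Bool.and_eq_true_iff.mp hpbprop).1
      have hpbne : pb.2 ≠ pa.2 := by
        have := (Bool.and_eq_true_iff.mp hpbprop).2
        simpa using this
      have hgetDb : S.1.getD pb.1 [] = pb.2 :=
        PySem.Dict.getD_of_mem_items S.1 (by simpa using hpbI) hnd []
      have hpane : pb ≠ pa := fun hh => hpbne (congrArg Prod.snd hh)
      have hkne : pb.1 ≠ pa.1 := fun hh => hpane (pv_key_inj hnd hpbI hpaI hh)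
      -- reduce both steps to their result states
      have hB : pvStepIdx e S =
          (((S.1.erase ia).erase pb.1).insert S.2.2.2 (pa.2 ++ pb.2),
           ((S.2.1.insert (PySem.List.pyGetD pa.2 0 "") ((S.2.1.getD (PySem.List.pyGetD pa.2 0 "") []).erase ia)).insert e.2.2
              (((S.2.1.insert (PySem.List.pyGetD pa.2 0 "") ((S.2.1.getD (PySem.List.pyGetD pa.2 0 "") []).erase ia)).getD e.2.2 []).erase pb.1)).modify
             (PySem.List.pyGetD pa.2 0 "") [] (· ++ [S.2.2.2]),
           ((S.2.2.1.insert e.2.1 ((S.2.2.1.getD e.2.1 []).erase ia)).insert (PySem.List.pyGetD pb.2 (-1) "")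
              (((S.2.2.1.insert e.2.1 ((S.2.2.1.getD e.2.1 []).erase ia)).getD (PySem.List.pyGetD pb.2 (-1) "") []).erase pb.1)).modify
             (PySem.List.pyGetD pb.2 (-1) "") [] (· ++ [S.2.2.2]),
           S.2.2.2 + 1) := by
        rw [pvStepIdx, hea]
        simp only [hgetDa]
        rw [show ((S.2.1.getD e.2.2 []).find? (fun i => S.1.getD i [] ≠ pa.2)) = some pb.1 by
          rw [hBfind, hfind]; rfl]
        simp only [hgetDb]
      have hA : pvStepB e F = ((F.erase pa.2).erase pb.2) ++ [pa.2 ++ pb.2] := by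
        rw [pvStepB, hfindA]
        simp only []
        rw [show F.find? (fun f => (PySem.List.pyGetD f 0 "" == e.2.2) && decide (f ≠ pa.2)) = some pb.2 by
          rw [hAfind, hfind]; rfl]
      rw [hA, hB]
      subst hpafst
      -- decompositions of the items list around pa and pb
      rcases List.filter_eq_cons_iff.mp hfila with ⟨l1, l2, hdec1, hl1, _, _⟩
      rcases (List.find?_eq_some_iff_append.mp hfind).2 with ⟨m1, m2, hdec2, hm1⟩
      have hnd1 : ((l1 ++ pa :: l2).map (·.1)).Nodup := hdec1 ▸ hnd
      have hsplit1 := pv_nodup_split hnd1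
      -- items after the first dict erase
      have hI1 : (S.1.erase pa.1).items = l1 ++ l2 := by
        show S.1.items.filter (fun p => !(p.1 == pa.1)) = l1 ++ l2
        rw [hdec1]
        exact pv_filter_key_decomp hsplit1.1 hsplit1.2
      -- the same list via the pb-decomposition
      have hI1' : (S.1.erase pa.1).items
          = m1.filter (fun p => !(p.1 == pa.1)) ++ pb :: m2.filter (fun p => !(p.1 == pa.1)) := by
        show S.1.items.filter (fun p => !(p.1 == pa.1)) = _
        rw [hdec2, List.filter_append, List.filter_cons]
        have : (!(pb.1 == pa.1)) = true := by simpa using hkne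
        rw [this]
        simp
      have hndI1 : ((S.1.erase pa.1).items.map (·.1)).Nodup := by
        rw [hI1]
        refine List.Nodup.sublist ?_ hnd1
        exact ((List.sublist_cons_self pa l2).append_left l1).map _
      have hnd2 : ((m1.filter (fun p => !(p.1 == pa.1)) ++ pb :: m2.filter (fun p => !(p.1 == pa.1))).map (·.1)).Nodup :=
        hI1' ▸ hndI1
      have hsplit2 := pv_nodup_split hnd2
      -- items after the second dict erase
      have hI2 : ((S.1.erase pa.1).erase pb.1).items
          = m1.filter (fun p => !(p.1 == pa.1)) ++ m2.filter (fun p => !(p.1 == pa.1)) := by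
        show (S.1.erase pa.1).items.filter (fun p => !(p.1 == pb.1)) = _
        rw [hI1']
        exact pv_filter_key_decomp hsplit2.1 hsplit2.2
      -- the value-level erases agree
      have hval1 : ∀ x ∈ l1, x.2 ≠ pa.2 := by
        intro x hx hxe
        have hthis := hl1 x hx
        rw [hxe] at hthis
        exact hthis hpaφ
      have hEA1 : F.erase pa.2 = (l1 ++ l2).map (·.2) := by
        rw [← hvals, hdec1]
        exact pv_value_erase hval1
      have hval2 : ∀ x ∈ m1.filter (fun p => !(p.1 == pa.1)), x.2 ≠ pb.2 := by
        intro x hx hxe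
        have hxm := hm1 x (List.mem_of_mem_filter hx)
        rw [hxe] at hxm
        rw [hpbφ] at hxm
        have hd : decide (pb.2 ≠ pa.2) = true := by simpa using hpbne
        rw [hd] at hxm
        simp at hxm
      have hEA2 : (F.erase pa.2).erase pb.2
          = (m1.filter (fun p => !(p.1 == pa.1)) ++ m2.filter (fun p => !(p.1 == pa.1))).map (·.2) := by
        rw [hEA1, ← hI1, hI1']
        exact pv_value_erase hval2
      -- the final items list
      have hmemI2 : ∀ p ∈ ((S.1.erase pa.1).erase pb.1).items, p ∈ S.1.items := by
        intro p hp
        exact List.mem_of_mem_filter (List.mem_of_mem_filter hp)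
      have hnotc : (((S.1.erase pa.1).erase pb.1).contains S.2.2.2) = false := by
        rw [Bool.eq_false_iff]
        intro hc
        rcases List.mem_map.mp ((PySem.Dict.contains_iff_mem_keys _ _).mp hc) with ⟨p, hp, hpe⟩
        exact absurd (hpe ▸ hbound p (hmemI2 p hp)) (lt_irrefl _)
      have hIns : (((S.1.erase pa.1).erase pb.1).insert S.2.2.2 (pa.2 ++ pb.2)).items
          = ((S.1.erase pa.1).erase pb.1).items ++ [(S.2.2.2, pa.2 ++ pb.2)] :=
        PySem.Dict.items_insert_of_not_contains _ _ hnotc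
      -- bucket computations shared by starts and ends
      have hbucket : ∀ (q : Int × List String → Bool),
          (((S.1.erase pa.1).erase pb.1).items.filter q).map (·.1)
            = (((S.1.items.filter q).map (·.1)).erase pa.1).erase pb.1 := by
        intro q
        have hndI1' : ((S.1.items.filter (fun p => !(p.1 == pa.1))).map (·.1)).Nodup := hndI1
        show (((S.1.items.filter (fun p => !(p.1 == pa.1))).filter (fun p => !(p.1 == pb.1))).filter q).map (·.1) = _
        rw [pv_mapfst_filter_erase (S.1.items.filter (fun p => !(p.1 == pa.1))) hndI1' q pb.1,
          pv_mapfst_filter_erase S.1.items hnd q pa.1]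
      refine ⟨?_, ?_, ?_, ?_, ?_, ?_⟩
      · -- values
        show _ = (F.erase pa.2).erase pb.2 ++ [pa.2 ++ pb.2]
        rw [hIns, List.map_append, hI2, hEA2]
        rfl
      · -- pairwise keys
        show (((((S.1.erase pa.1).erase pb.1).insert S.2.2.2 (pa.2 ++ pb.2))).items).Pairwise _
        rw [hIns]
        refine List.pairwise_append.mpr ⟨?_, ?_, ?_⟩
        · exact hpw.sublist (List.filter_sublist.trans List.filter_sublist)
        · simp
        · intro p hp b hb
          rw [List.mem_singleton.mp hb]
          exact hbound p (hmemI2 p hp)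
      · -- bound
        intro p hp
        rw [hIns] at hp
        rcases List.mem_append.mp hp with hp | hp
        · have := hbound p (hmemI2 p hp)
          show p.1 < S.2.2.2 + 1
          omega
        · rw [List.mem_singleton.mp hp]
          show S.2.2.2 < S.2.2.2 + 1
          omega
      · -- nonempty values
        intro p hp
        rw [hIns] at hp
        rcases List.mem_append.mp hp with hp | hp
        · exact hne p (hmemI2 p hp)
        · rw [List.mem_singleton.mp hp]
          have := hne pa hpaI
          intro hh
          exact this (List.append_eq_nil_iff.mp hh).1
      · -- starts buckets
        intro w
        have hu : ∀ w', pa.1 ∈ S.2.1.getD w' [] → w' = PySem.List.pyGetD pa.2 0 "" := by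
          intro w' hm
          rw [hst w'] at hm
          have := (pv_mem_bucket_iff hnd hpaI _).mp hm
          exact (eq_of_beq this).symm
        have hv : ∀ w', pb.1 ∈ S.2.1.getD w' [] → w' = e.2.2 := by
          intro w' hm
          rw [hst w'] at hm
          have := (pv_mem_bucket_iff hnd hpbI _).mp hm
          exact (eq_of_beq this).symm.trans (eq_of_beq hpbφ)
        rw [pv_bucket_chain S.2.1 (PySem.List.pyGetD pa.2 0 "") e.2.2 (PySem.List.pyGetD pa.2 0 "")
          pa.1 pb.1 S.2.2.2 hu hv w]
        show _ = ((((((S.1.erase pa.1).erase pb.1).insert S.2.2.2 (pa.2 ++ pb.2))).items.filter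
            (fun p => PySem.List.pyGetD p.2 0 "" == w)).map (·.1))
        rw [hIns, List.filter_append, List.map_append, hbucket, hst w, List.filter_cons]
        have hcond : (PySem.List.pyGetD ((S.2.2.2, pa.2 ++ pb.2) : Int × List String).2 0 "" == w)
            = (PySem.List.pyGetD pa.2 0 "" == w) := by
          show (PySem.List.pyGetD (pa.2 ++ pb.2) 0 "" == w) = _
          rw [pv_pyGetD_zero_append _ _ (hne pa hpaI)]
        rw [hcond]
        by_cases hc : (PySem.List.pyGetD pa.2 0 "" == w) = true
        · rw [if_pos hc, hc]
          rfl
        · rw [if_neg hc, Bool.eq_false_iff.mpr hc]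
          rfl
      · -- ends buckets
        intro w
        have hu : ∀ w', pa.1 ∈ S.2.2.1.getD w' [] → w' = e.2.1 := by
          intro w' hm
          rw [hen w'] at hm
          have := (pv_mem_bucket_iff hnd hpaI _).mp hm
          exact (eq_of_beq this).symm.trans (eq_of_beq hpaφ)
        have hv : ∀ w', pb.1 ∈ S.2.2.1.getD w' [] → w' = PySem.List.pyGetD pb.2 (-1) "" := by
          intro w' hm
          rw [hen w'] at hm
          have := (pv_mem_bucket_iff hnd hpbI _).mp hm
          exact (eq_of_beq this).symm
        rw [pv_bucket_chain S.2.2.1 e.2.1 (PySem.List.pyGetD pb.2 (-1) "") (PySem.List.pyGetD pb.2 (-1) "")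
          pa.1 pb.1 S.2.2.2 hu hv w]
        show _ = ((((((S.1.erase pa.1).erase pb.1).insert S.2.2.2 (pa.2 ++ pb.2))).items.filter
            (fun p => PySem.List.pyGetD p.2 (-1) "" == w)).map (·.1))
        rw [hIns, List.filter_append, List.map_append, hbucket, hen w, List.filter_cons]
        have hcond : (PySem.List.pyGetD ((S.2.2.2, pa.2 ++ pb.2) : Int × List String).2 (-1) "" == w)
            = (PySem.List.pyGetD pb.2 (-1) "" == w) := by
          show (PySem.List.pyGetD (pa.2 ++ pb.2) (-1) "" == w) = _
          rw [pv_pyGetD_neg_one_append _ _ (hne pb hpbI)]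
        rw [hcond]
        by_cases hc : (PySem.List.pyGetD pb.2 (-1) "" == w) = true
        · rw [if_pos hc, hc]
          rfl
        · rw [if_neg hc, Bool.eq_false_iff.mpr hc]
          rfl

theorem pv_fold_sim (es : List (Int × String × String)) (F : List (List String))
    (S : PySem.Dict Int (List String) × PySem.Dict String (List Int) × PySem.Dict String (List Int) × Int)
    (h : pvInv F S) :
    pvInv (es.foldl (fun F e => pvStepB e F) F) (es.foldl (fun S e => pvStepIdx e S) S) := by
  induction es generalizing F S with
  | nil => exact h
  | cons e t ih => exact ih _ _ (pv_step_sim e F S h)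

theorem pv_init_step (w : String) (s : Int) (f : PySem.Dict Int (List String))
    (st en : PySem.Dict String (List Int)) (F : List (List String))
    (h : pvInv F (f, st, en, s)) :
    pvInv (F ++ [[w]]) (f.insert s [w], st.modify w [] (· ++ [s]), en.modify w [] (· ++ [s]), s + 1) := by
  obtain ⟨hvals, hpw, hbound, hne, hst, hen⟩ := h
  have hnotc : f.contains s = false := by
    rw [Bool.eq_false_iff]
    intro hc
    rcases List.mem_map.mp ((PySem.Dict.contains_iff_mem_keys _ _).mp hc) with ⟨p, hp, hpe⟩
    exact absurd (hpe ▸ hbound p hp) (lt_irrefl _)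
  have hIns : (f.insert s [w]).items = f.items ++ [(s, [w])] :=
    PySem.Dict.items_insert_of_not_contains _ _ hnotc
  have hg0 : PySem.List.pyGetD [w] 0 "" = w := PySem.List.pyGetD_zero_cons w [] ""
  have hg1 : PySem.List.pyGetD [w] (-1) "" = w := by
    simp only [PySem.List.pyGetD, PySem.List.pyGet?, List.length_cons, List.length_nil,
      pv_pyIdx_neg_one 1 (by omega)]
    rfl
  refine ⟨?_, ?_, ?_, ?_, ?_, ?_⟩
  · show ((f.insert s [w]).items).map (·.2) = F ++ [[w]]
    rw [hIns, List.map_append, hvals]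
    rfl
  · show ((f.insert s [w]).items).Pairwise _
    rw [hIns]
    refine List.pairwise_append.mpr ⟨hpw, by simp, ?_⟩
    intro p hp b hb
    rw [List.mem_singleton.mp hb]
    exact hbound p hp
  · intro p hp
    rw [hIns] at hp
    rcases List.mem_append.mp hp with hp | hp
    · have hb2 : p.1 < s := hbound p hp
      show p.1 < s + 1
      omega
    · rw [List.mem_singleton.mp hp]
      show s < s + 1
      omega
  · intro p hp
    rw [hIns] at hp
    rcases List.mem_append.mp hp with hp | hp
    · exact hne p hp
    · rw [List.mem_singleton.mp hp]
      simp
  · intro w'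
    show (st.modify w [] (· ++ [s])).getD w' []
      = (((f.insert s [w]).items.filter (fun p => PySem.List.pyGetD p.2 0 "" == w')).map (·.1))
    rw [PySem.Dict.getD_modify, hIns, List.filter_append, List.map_append, List.filter_cons]
    have hc : (PySem.List.pyGetD (((s, [w]) : Int × List String)).2 0 "" == w') = (w == w') := by
      show (PySem.List.pyGetD [w] 0 "" == w') = _
      rw [hg0]
    rw [hc]
    by_cases hw : w' = w
    · rw [if_pos hw, hst w, hw, if_pos (by simp)]
      simp
    · rw [if_neg hw, hst w', if_neg (by simpa using fun hh => hw (eq_of_beq hh).symm)]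
      simp
  · intro w'
    show (en.modify w [] (· ++ [s])).getD w' []
      = (((f.insert s [w]).items.filter (fun p => PySem.List.pyGetD p.2 (-1) "" == w')).map (·.1))
    rw [PySem.Dict.getD_modify, hIns, List.filter_append, List.map_append, List.filter_cons]
    have hc : (PySem.List.pyGetD (((s, [w]) : Int × List String)).2 (-1) "" == w') = (w == w') := by
      show (PySem.List.pyGetD [w] (-1) "" == w') = _
      rw [hg1]
    rw [hc]
    by_cases hw : w' = w
    · rw [if_pos hw, hen w, hw, if_pos (by simp)]
      simp
    · rw [if_neg hw, hen w', if_neg (by simpa using fun hh => hw (eq_of_beq hh).symm)]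
      simp

theorem pv_init_gen (ws : List String) :
    ∀ (s : Int) (f : PySem.Dict Int (List String)) (st en : PySem.Dict String (List Int))
      (F : List (List String)), pvInv F (f, st, en, s) →
    pvInv (F ++ ws.map (fun w => [w]))
      (((PySem.List.enumerate ws s).foldl
          (fun acc iw => (acc.1.insert iw.1 [iw.2], acc.2.1.modify iw.2 [] (· ++ [iw.1]),
            acc.2.2.modify iw.2 [] (· ++ [iw.1]))) (f, st, en)).1,
       ((PySem.List.enumerate ws s).foldl
          (fun acc iw => (acc.1.insert iw.1 [iw.2], acc.2.1.modify iw.2 [] (· ++ [iw.1]),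
            acc.2.2.modify iw.2 [] (· ++ [iw.1]))) (f, st, en)).2.1,
       ((PySem.List.enumerate ws s).foldl
          (fun acc iw => (acc.1.insert iw.1 [iw.2], acc.2.1.modify iw.2 [] (· ++ [iw.1]),
            acc.2.2.modify iw.2 [] (· ++ [iw.1]))) (f, st, en)).2.2,
       s + ws.length) := by
  induction ws with
  | nil =>
    intro s f st en F h
    simpa using h
  | cons w t ih =>
    intro s f st en F h
    rw [PySem.List.enumerate_cons, List.foldl_cons]
    have hstep := pv_init_step w s f st en F h
    have hiht := ih (s + 1) (f.insert s [w]) (st.modify w [] (· ++ [s])) (en.modify w [] (· ++ [s]))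
      (F ++ [[w]]) hstep
    have harr : F ++ [[w]] ++ t.map (fun w => [w]) = F ++ (w :: t).map (fun w => [w]) := by
      rw [List.append_assoc, List.map_cons]
      rfl
    have hlen : s + 1 + (t.length : Int) = s + ((w :: t).length : Int) := by
      rw [List.length_cons]
      push_cast
      ring
    rw [harr, hlen] at hiht
    exact hiht

theorem pv_init_sim (words : List String) :
    pvInv (words.map (fun w => [w]))
      ((pvInitState words).1, (pvInitState words).2.1, (pvInitState words).2.2, (words.length : Int)) := by
  have hbase : pvInv [] (PySem.Dict.empty, PySem.Dict.empty, PySem.Dict.empty, (0 : Int)) := by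
    refine ⟨rfl, List.Pairwise.nil, ?_, ?_, ?_, ?_⟩
    · intro p hp; cases hp
    · intro p hp; cases hp
    · intro w; rfl
    · intro w; rfl
  have h := pv_init_gen words 0 PySem.Dict.empty PySem.Dict.empty PySem.Dict.empty [] hbase
  rw [List.nil_append, zero_add] at h
  exact h

-- ########## main ##########

theorem pv_main (reports words : List String) :
    optimal_report_bleu2_given_words reports words
      = optimal_report_bleu2_given_words_alt reports words := by
  unfold optimal_report_bleu2_given_words optimal_report_bleu2_given_words_alt
  rw [pv_sorted_entries_eq, pv_loopA_eq_foldl]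
  have hsim := pv_fold_sim (pvSortT (pvEntries reports words)) (words.map (fun w => [w]))
    ((pvInitState words).1, (pvInitState words).2.1, (pvInitState words).2.2, (words.length : Int))
    (pv_init_sim words)
  have hvals := hsim.1
  show PySem.Str.join " " (List.flatMap (fun f => f) _) = PySem.Str.join " " (List.flatMap (fun f => f) _)
  congr 1
  rw [← hvals]
  rfl

-- ===== VERDICT (by name: the statement is the Claim_ definition above) =====
theorem optimal_report_bleu2_given_words_spec : Claim_equal_optimal_report_bleu2_given_words := by
  intro reports words _
  unfold Spec_optimal_report_bleu2_given_words
  exact pv_main reports words
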